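-- pv_equiv track=rewrite | github.com/mochilang/mochi | tests/leetcode/x/python/0440.py | count_prefix
-- ===== SOURCE A (Python) =====
-- def count_prefix(n: int, prefix: int) -> int:
--     steps = 0
--     first = prefix
--     next_prefix = prefix + 1
--     while first <= n:
--         steps += min(n + 1, next_prefix) - first
--         first *= 10
--         next_prefix *= 10
--     return steps
-- ===== SOURCE B (Python) =====
-- def count_prefix(n: int, prefix: int) -> int:
--     # Closed form: all trie levels below the deepest are fully inside [prefix, n],
--     # so only the deepest level's width needs clamping.
--     if prefix > n:
--         return 0
--     p = prefix
--     w = 1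
--     while p * 10 <= n:
--         p *= 10
--         w *= 10
--     return (w - 1) // 9 + min(n + 1 - p, w)
-- ===== Notes on version B (the rewrite author's own statement) =====
-- stated objective: alternative
-- what changed: B replaces A's per-level width accumulation (tracking first and next_prefix and summing min(n+1,next_prefix)-first each iteration) by a closed form: it only locates the deepest level (largest power of 10 with prefix*10^K <= n) and computes the answer as the geometric sum (10^K-1)//9 plus the clamped width of that last level.
import Mathlib
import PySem

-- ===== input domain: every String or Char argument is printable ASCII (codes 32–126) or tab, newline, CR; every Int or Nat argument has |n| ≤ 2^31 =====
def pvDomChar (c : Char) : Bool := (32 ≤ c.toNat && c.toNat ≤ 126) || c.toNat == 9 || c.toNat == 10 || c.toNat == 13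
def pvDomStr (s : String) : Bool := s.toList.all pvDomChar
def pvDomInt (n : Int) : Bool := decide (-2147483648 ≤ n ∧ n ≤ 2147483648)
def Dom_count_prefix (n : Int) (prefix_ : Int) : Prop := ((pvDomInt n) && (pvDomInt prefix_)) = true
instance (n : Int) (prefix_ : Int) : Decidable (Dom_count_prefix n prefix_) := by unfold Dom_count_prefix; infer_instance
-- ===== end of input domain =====

-- B computes A's sum by a closed form (geometric sum + clamped last level) instead of
-- accumulating each level's width; same cost, different decomposition.

-- ===== PORT A =====
-- A's while loop, fuel-bounded: under Pre_ (1 ≤ prefix or n < prefix) the loop runs at most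
-- 11 times on Dom inputs, so fuel 65 is never exhausted there.
def countPrefixLoopA (n : Int) : Nat → Int → Int → Int → Int
  | 0, _, _, steps => steps
  | f + 1, first, next_prefix, steps =>
    if first ≤ n then
      countPrefixLoopA n f (first * 10) (next_prefix * 10)
        (steps + (min (n + 1) next_prefix - first))
    else steps

def count_prefix (n : Int) (prefix_ : Int) : Int :=
  countPrefixLoopA n 65 prefix_ (prefix_ + 1) 0

-- ===== PORT B =====
-- B's while loop: find the deepest level (p, w) = (prefix*10^K, 10^K) with p*10 > n.
def countPrefixLoopB (n : Int) : Nat → Int → Int → Int × Int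
  | 0, p, w => (p, w)
  | f + 1, p, w => if p * 10 ≤ n then countPrefixLoopB n f (p * 10) (w * 10) else (p, w)

def count_prefix_alt (n : Int) (prefix_ : Int) : Int :=
  if prefix_ > n then 0
  else
    let pw := countPrefixLoopB n 64 prefix_ 1
    PySem.Int.floordiv (pw.2 - 1) 9 + min (n + 1 - pw.1) pw.2

-- ===== PRECONDITION & SPEC =====
-- Pre_ excludes exactly the inputs (prefix ≤ 0 and prefix ≤ n) on which A's while loop never
-- terminates (first stays ≤ n forever); B diverges there as well.
def Pre_count_prefix (n : Int) (prefix_ : Int) : Prop := 1 ≤ prefix_ ∨ n < prefix_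
instance (n : Int) (prefix_ : Int) : Decidable (Pre_count_prefix n prefix_) := by
  unfold Pre_count_prefix; infer_instance

def pvWitness_count_prefix : Int × Int := (13, 1)

def Spec_count_prefix (n : Int) (prefix_ : Int) (out : Int) : Prop := out = count_prefix_alt n prefix_
instance (n : Int) (prefix_ : Int) (out : Int) : Decidable (Spec_count_prefix n prefix_ out) := by
  unfold Spec_count_prefix; infer_instance

-- ===== CLAIM (what is proved, stated in full; the proofs are below) =====
def Claim_equal_count_prefix : Prop := ∀ (n : Int) (prefix_ : Int), Dom_count_prefix n prefix_ → Pre_count_prefix n prefix_ → Spec_count_prefix n prefix_ (count_prefix n prefix_)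

-- ===== LEMMAS AND PROOFS =====

-- B's loop multiplies w by 10 each step, so W - w stays divisible by 9.
theorem loopB_dvd (n : Int) : ∀ (f : Nat) (p w : Int), (9 : Int) ∣ (countPrefixLoopB n f p w).2 - w := by
  intro f
  induction f with
  | zero => intro p w; simp [countPrefixLoopB]
  | succ f ih =>
    intro p w
    simp only [countPrefixLoopB]
    split
    · have h := ih (p * 10) (w * 10)
      omega
    · simp

-- Main correspondence: one extra unit of fuel on A's side, A's next_prefix = first + w,
-- and the invariants 1 ≤ first, 1 ≤ w ≤ 9*first, first ≤ n.
theorem loopAB (n : Int) : ∀ (f : Nat) (first w steps : Int), 1 ≤ first → 1 ≤ w → w ≤ 9 * first →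
    first ≤ n →
    countPrefixLoopA n (f + 1) first (first + w) steps =
      steps + ((countPrefixLoopB n f first w).2 - w) / 9 +
        min (n + 1 - (countPrefixLoopB n f first w).1) (countPrefixLoopB n f first w).2 := by
  intro f
  induction f with
  | zero =>
    intro first w steps h1 hw _ hn
    simp only [countPrefixLoopA, countPrefixLoopB, if_pos hn]
    omega
  | succ f ih =>
    intro first w steps h1 hw hw9 hn
    simp only [countPrefixLoopB]
    by_cases h10 : first * 10 ≤ n
    · rw [if_pos h10]
      have hmin : min (n + 1) (first + w) = first + w := by omega
      have hstep : countPrefixLoopA n (f + 1 + 1) first (first + w) steps =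
          countPrefixLoopA n (f + 1) (first * 10) (first * 10 + w * 10)
            (steps + w) := by
        simp only [countPrefixLoopA, if_pos hn, hmin]
        ring_nf
      rw [hstep, ih (first * 10) (w * 10) (steps + w) (by omega) (by omega) (by omega) h10]
      obtain ⟨q, hq⟩ := loopB_dvd n f (first * 10) (w * 10)
      have hq' : (countPrefixLoopB n f (first * 10) (w * 10)).2 - w * 10 = 9 * q := hq
      have e1 : ((countPrefixLoopB n f (first * 10) (w * 10)).2 - w * 10) / 9 = q := by
        rw [hq']; exact Int.mul_ediv_cancel_left q (by norm_num)
      have e2 : ((countPrefixLoopB n f (first * 10) (w * 10)).2 - w) / 9 = q + w := by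
        have : (countPrefixLoopB n f (first * 10) (w * 10)).2 - w = 9 * (q + w) := by omega
        rw [this]; exact Int.mul_ediv_cancel_left _ (by norm_num)
      rw [e1, e2]; ring
    · rw [if_neg h10]
      simp only [countPrefixLoopA, if_pos hn, if_neg h10]
      omega

-- ===== VERDICT (by name: the statement is the Claim_ definition above) =====
theorem count_prefix_spec : Claim_equal_count_prefix := by
  intro n prefix_ _ hpre
  unfold Spec_count_prefix count_prefix count_prefix_alt
  by_cases hgt : prefix_ > n
  · rw [if_pos hgt]
    have : ¬ prefix_ ≤ n := by omega
    simp [countPrefixLoopA, this]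
  · rw [if_neg hgt]
    show countPrefixLoopA n 65 prefix_ (prefix_ + 1) 0 =
      PySem.Int.floordiv ((countPrefixLoopB n 64 prefix_ 1).2 - 1) 9 +
        min (n + 1 - (countPrefixLoopB n 64 prefix_ 1).1) (countPrefixLoopB n 64 prefix_ 1).2
    have hp1 : 1 ≤ prefix_ := by
      rcases hpre with h | h
      · exact h
      · omega
    have hn : prefix_ ≤ n := by omega
    have h := loopAB n 64 prefix_ 1 0 hp1 (by norm_num) (by omega) hn
    have hfd : PySem.Int.floordiv ((countPrefixLoopB n 64 prefix_ 1).2 - 1) 9 =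
        ((countPrefixLoopB n 64 prefix_ 1).2 - 1) / 9 :=
      PySem.Int.floordiv_eq_ediv_of_pos (by norm_num)
    rw [hfd]
    simpa using h
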